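-- pv_equiv track=rewrite | github.com/bitsawer/renpy-shader | ShaderDemo/game/shader/skinnedmesh.py | getIndexAdjacency
-- ===== SOURCE A (Python) =====
-- def getIndexAdjacency(tris):
--     adjacency = {}
--     for i, tri in enumerate(tris):
--         for i2, tri2 in enumerate(tris):
--             if i != i2:
--                 for index in tri:
--                    if index in tri2:
--                        adj = adjacency.get(index, [])
--                        adj.append((tri2, i2))
--                        adjacency[index] = adj
--     return adjacency
-- ===== SOURCE B (Python) =====
-- def getIndexAdjacency(tris):
--     # Index each vertex by the triangles that contain it, then visit, per
--     # triangle, only the triangles that share a vertex with it.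
--     triangles_with = {}
--     for i, tri in enumerate(tris):
--         for v in tri:
--             triangles_with.setdefault(v, []).append(i)
--     adjacency = {}
--     for i, tri in enumerate(tris):
--         for j in sorted({j for v in tri for j in triangles_with[v]} - {i}):
--             tri2 = tris[j]
--             for v in tri:
--                 if v in tri2:
--                     adjacency.setdefault(v, []).append((tri2, j))
--     return adjacency
-- ===== Notes on version B (the rewrite author's own statement) =====
-- stated objective: alternative
-- what changed: Instead of comparing every triangle against every other triangle (A's all-pairs double loop), B builds a vertex->triangles index in one pass and then, per triangle, visits only the neighbouring triangles that actually share a vertex (in ascending id order); on densely shared meshes the adjacency itself is quadratic, so B is not measurably faster there.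
import Mathlib
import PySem

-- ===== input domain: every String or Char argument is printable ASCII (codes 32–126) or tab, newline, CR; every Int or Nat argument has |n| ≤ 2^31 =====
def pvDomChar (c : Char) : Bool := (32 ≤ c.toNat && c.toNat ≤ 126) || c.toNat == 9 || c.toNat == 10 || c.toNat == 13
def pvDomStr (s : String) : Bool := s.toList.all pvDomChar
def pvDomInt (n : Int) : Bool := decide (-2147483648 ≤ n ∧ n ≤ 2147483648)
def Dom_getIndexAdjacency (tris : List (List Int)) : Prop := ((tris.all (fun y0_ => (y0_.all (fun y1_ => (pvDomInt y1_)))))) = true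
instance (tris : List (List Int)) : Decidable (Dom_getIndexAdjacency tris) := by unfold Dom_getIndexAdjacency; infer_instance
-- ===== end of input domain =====

-- B replaces A's all-pairs triangle scan by a vertex->triangles index, visiting per triangle only the neighbours that actually share a vertex (an alternative, index-based algorithm; same result).

-- ===== PORT A =====
-- literal transliteration of the quadratic double loop building `adjacency`
def getIndexAdjacency (tris : List (List Int)) : List (Int × List (List Int × Int)) :=
  ((PySem.List.enumerate tris 0).foldl (fun d p =>
    (PySem.List.enumerate tris 0).foldl (fun d q =>
      if p.1 ≠ q.1 then
        p.2.foldl (fun d idx =>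
          if q.2.contains idx then d.insert idx (d.getD idx [] ++ [(q.2, q.1)]) else d) d
      else d) d) (PySem.Dict.empty : PySem.Dict Int (List (List Int × Int)))).items

-- ===== PORT B =====
-- transliteration of Source B: build triangles_with, then loop over sorted neighbour ids only
def getIndexAdjacency_alt (tris : List (List Int)) : List (Int × List (List Int × Int)) :=
  let tw : PySem.Dict Int (List Int) :=
    (PySem.List.enumerate tris 0).foldl (fun d p =>
      p.2.foldl (fun d v => d.modify v [] (· ++ [p.1])) d) PySem.Dict.empty
  ((PySem.List.enumerate tris 0).foldl (fun d p =>
    (PySem.List.sorted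
        (PySem.Set.discard (PySem.Set.ofList (p.2.flatMap (fun v => tw.getD v []))) p.1)
        (fun x => x) false).foldl (fun d j =>
      -- tris[j]: every j stored in triangles_with is a valid index, so the default is never used
      let tri2 := PySem.List.pyGetD tris j []
      p.2.foldl (fun d v =>
        if tri2.contains v then d.modify v [] (· ++ [(tri2, j)]) else d) d) d)
    (PySem.Dict.empty : PySem.Dict Int (List (List Int × Int)))).items

-- ===== PRECONDITION & SPEC =====
def Spec_getIndexAdjacency (tris : List (List Int)) (out : List (Int × List (List Int × Int))) : Prop := out = getIndexAdjacency_alt tris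
instance (tris : List (List Int)) (out : List (Int × List (List Int × Int))) : Decidable (Spec_getIndexAdjacency tris out) := by unfold Spec_getIndexAdjacency; infer_instance

-- ===== CLAIM (what is proved, stated in full; the proofs are below) =====
def Claim_equal_getIndexAdjacency : Prop := ∀ (tris : List (List Int)), Dom_getIndexAdjacency tris → Spec_getIndexAdjacency tris (getIndexAdjacency tris)

-- ===== LEMMAS AND PROOFS =====

def pvE (tris : List (List Int)) : List (Int × List Int) := PySem.List.enumerate tris 0

-- the triangles_with dictionary of Source B
def pvTW (tris : List (List Int)) : PySem.Dict Int (List Int) :=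
  (pvE tris).foldl (fun d p => p.2.foldl (fun d v => d.modify v [] (· ++ [p.1])) d)
    PySem.Dict.empty

-- the ascending list of triangles (with their ids) that A's row at (i', tri) actually touches
def pvTarget (tris : List (List Int)) (i' : Int) (tri : List Int) : List (Int × List Int) :=
  (pvE tris).filter (fun q => decide (i' ≠ q.1) && tri.any (fun v => q.2.contains v))

theorem pv_modify_append {κ ν : Type} [BEq κ] (d : PySem.Dict κ (List ν)) (k : κ) (x : ν) :
    d.modify k [] (· ++ [x]) = d.insert k (d.getD k [] ++ [x]) :=
  PySem.Dict.ext_iff.mpr rfl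

theorem pv_mem_E {tris : List (List Int)} {p : Int × List Int} :
    p ∈ pvE tris ↔ ∃ (k : Nat) (h : k < tris.length), p = ((k : Int), tris[k]) := by
  simpa [pvE] using PySem.List.mem_enumerate_iff tris 0 p

theorem pv_getE {tris : List (List Int)} {q : Int × List Int} (hq : q ∈ pvE tris) :
    PySem.List.pyGetD tris q.1 [] = q.2 := by
  rcases pv_mem_E.1 hq with ⟨k, hk, rfl⟩
  simp [PySem.List.pyGetD_natCast, List.getElem?_eq_getElem hk]

theorem pv_TW_flat (tris : List (List Int)) :
    pvTW tris = ((pvE tris).flatMap (fun p => p.2.map (fun v => (v, p.1)))).foldl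
      (fun d e => d.modify e.1 [] (· ++ [e.2])) PySem.Dict.empty := by
  unfold pvTW
  rw [List.foldl_flatMap]
  refine PySem.List.foldl_congr_mem _ _ _ _ ?_
  intro d p _
  rw [List.foldl_map]

theorem pv_TW_mem (tris : List (List Int)) (v j : Int) :
    j ∈ (pvTW tris).getD v [] ↔ ∃ q ∈ pvE tris, j = q.1 ∧ v ∈ q.2 := by
  rw [pv_TW_flat, PySem.Dict.getD_foldl_modify_append, PySem.Dict.getD_empty, List.nil_append]
  simp only [List.mem_map, List.mem_filter, List.mem_flatMap]
  constructor
  · rintro ⟨e, ⟨⟨q, hq, ⟨u, hu, rfl⟩⟩, hev⟩, rfl⟩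
    have huv : u = v := by simpa using hev
    exact ⟨q, hq, rfl, huv ▸ hu⟩
  · rintro ⟨q, hq, rfl, hv⟩
    exact ⟨(v, q.1), ⟨⟨q, hq, ⟨v, hv, rfl⟩⟩, by simp⟩, rfl⟩

theorem pv_target_pairwise (tris : List (List Int)) (i' : Int) (tri : List Int) :
    ((pvTarget tris i' tri).map (fun q => q.1)).Pairwise (· < ·) := by
  rw [List.pairwise_map]
  exact (PySem.List.pairwise_lt_enumerate tris 0).filter _

theorem pv_nbrs (tris : List (List Int)) (i' : Int) (tri : List Int) :
    PySem.List.sorted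
      (PySem.Set.discard (PySem.Set.ofList (tri.flatMap (fun v => (pvTW tris).getD v []))) i')
      (fun x => x) false
    = (pvTarget tris i' tri).map (fun q => q.1) := by
  refine PySem.List.sorted_eq_of_perm_of_pairwise_lt _ _ _ ?_ (pv_target_pairwise tris i' tri)
  have hnd1 : ((pvTarget tris i' tri).map (fun q => q.1)).Nodup :=
    (pv_target_pairwise tris i' tri).imp (fun h => ne_of_lt h)
  have hnd2 : (PySem.Set.discard
      (PySem.Set.ofList (tri.flatMap (fun v => (pvTW tris).getD v []))) i').Nodup :=
    PySem.Set.nodup_discard _ _ (PySem.Set.nodup_ofList _)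
  refine (List.perm_ext_iff_of_nodup hnd1 hnd2).2 ?_
  intro j
  rw [PySem.Set.mem_discard, PySem.Set.mem_ofList, List.mem_flatMap]
  simp only [List.mem_map, pvTarget, List.mem_filter]
  constructor
  · rintro ⟨q, ⟨hq, hcond⟩, rfl⟩
    simp only [Bool.and_eq_true, decide_eq_true_eq, List.any_eq_true] at hcond
    rcases hcond with ⟨hne, v, hv, hvc⟩
    exact ⟨⟨v, hv, (pv_TW_mem tris v q.1).2 ⟨q, hq, rfl, by simpa using hvc⟩⟩,
      fun e => hne e.symm⟩
  · rintro ⟨⟨v, hv, hj⟩, hne⟩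
    rcases (pv_TW_mem tris v j).1 hj with ⟨q, hq, rfl, hvq⟩
    refine ⟨q, ⟨hq, ?_⟩, rfl⟩
    simp only [Bool.and_eq_true, decide_eq_true_eq, List.any_eq_true]
    exact ⟨fun e => hne e.symm, v, hv, by simpa using hvq⟩

-- A's inner loop is a no-op on a triangle sharing no vertex with tri
theorem pv_inner_noshare (tri q2 : List Int) (j : Int)
    (d : PySem.Dict Int (List (List Int × Int)))
    (h : ∀ v ∈ tri, q2.contains v = false) :
    tri.foldl (fun d v =>
      if q2.contains v then d.insert v (d.getD v [] ++ [(q2, j)]) else d) d = d := by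
  rw [PySem.List.foldl_congr_mem _ _ (fun d _ => d) _
    (fun d v hv => by rw [h v hv]; simp)]
  exact PySem.List.foldl_ignore _ _

-- one row of A (fixed p = (i', tri)) equals one row of B
theorem pv_row (tris : List (List Int)) (i' : Int) (tri : List Int)
    (d : PySem.Dict Int (List (List Int × Int))) :
    (pvE tris).foldl (fun d q =>
      if i' ≠ q.1 then
        tri.foldl (fun d v =>
          if q.2.contains v then d.insert v (d.getD v [] ++ [(q.2, q.1)]) else d) d
      else d) d
    = ((pvTarget tris i' tri).map (fun q => q.1)).foldl (fun d j =>
        tri.foldl (fun d v =>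
          if (PySem.List.pyGetD tris j []).contains v then
            d.modify v [] (· ++ [(PySem.List.pyGetD tris j [], j)])
          else d) d) d := by
  rw [List.foldl_map]
  rw [PySem.List.foldl_congr_mem (pvE tris) _
    (fun d q => if (decide (i' ≠ q.1) && tri.any (fun v => q.2.contains v)) then
        tri.foldl (fun d v =>
          if q.2.contains v then d.insert v (d.getD v [] ++ [(q.2, q.1)]) else d) d
      else d) d ?_]
  · rw [PySem.List.foldl_if_eq_foldl_filter]
    refine PySem.List.foldl_congr_mem _ _ _ _ ?_
    intro d q hq
    have hqE : q ∈ pvE tris := List.mem_of_mem_filter hq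
    rw [pv_getE hqE]
    refine PySem.List.foldl_congr_mem _ _ _ _ ?_
    intro d v _
    rw [pv_modify_append]
  · intro d q _
    beta_reduce
    by_cases h1 : i' ≠ q.1
    · by_cases h2 : tri.any (fun v => q.2.contains v) = true
      · have hc : (decide (i' ≠ q.1) && tri.any fun v => q.2.contains v) = true := by
          simp only [Bool.and_eq_true, decide_eq_true_eq]; exact ⟨h1, h2⟩
        rw [if_pos h1, if_pos hc]
      · have hc : ¬((decide (i' ≠ q.1) && tri.any fun v => q.2.contains v) = true) := by
          simp only [Bool.and_eq_true, decide_eq_true_eq]; exact fun hcc => h2 hcc.2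
        have h2' : ∀ v ∈ tri, v ∉ q.2 := by simpa using h2
        have hns : ∀ v ∈ tri, q.2.contains v = false := fun v hv => by
          simpa using h2' v hv
        rw [if_pos h1, if_neg hc, pv_inner_noshare tri q.2 q.1 d hns]
    · have hc : ¬((decide (i' ≠ q.1) && tri.any fun v => q.2.contains v) = true) := by
        simp only [Bool.and_eq_true, decide_eq_true_eq]; exact fun hcc => h1 hcc.1
      rw [if_neg h1, if_neg hc]

-- ===== VERDICT (by name: the statement is the Claim_ definition above) =====
theorem getIndexAdjacency_spec : Claim_equal_getIndexAdjacency := by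
  intro tris _
  unfold Spec_getIndexAdjacency getIndexAdjacency getIndexAdjacency_alt
  congr 1
  refine PySem.List.foldl_congr_mem _ _ _ _ ?_
  intro d p _
  rw [show ((PySem.List.enumerate tris 0).foldl
      (fun d p => p.2.foldl (fun d v => d.modify v [] (· ++ [p.1])) d)
      PySem.Dict.empty) = pvTW tris from rfl,
    pv_nbrs tris p.1 p.2]
  exact pv_row tris p.1 p.2 d
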